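-- pv_equiv track=rewrite | github.com/tnsatt/multicon | multicon/downloader/core/common.py | defaultExt
-- ===== SOURCE A (Python) =====
-- def urlGuessExt(url):
--     arr = {
--         "image": [
--             ["jpg", "jpeg", "gif"],
--             ["image", "img"],
--         ],
--         "video": [
--             ["mp4", "mkv", "ts"],
--             ["video"],
--         ],
--         "audio": [
--             ["mp3"],
--             ["audio", "music"],
--         ],
--     }
--     for i in arr:
--         for j in arr[i][0]:
--             if "." + j in url:
--                 return j
--     for i in arr:
--         for j in arr[i][1]:
--             if j in url:
--                 return arr[i][0][0]
--     return None
--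
-- def defaultExt(url, defExt="html"):
--     data = {
--         'mp4': ["tiktok"]
--     }
--     list = key = item = None
--     for key in data:
--         list = data[key]
--         for item in list:
--             if item in url:
--                 return key
--     ext = urlGuessExt(url)
--     if ext:
--         return ext
--     return defExt
-- ===== SOURCE B (Python) =====
-- # One flat precedence-ordered table (tiktok, then dotted extensions, then keywords),
-- # scanned once; first matching substring wins.
-- _EXT_TABLE = [
--     ("tiktok", "mp4"),
--     (".jpg", "jpg"), (".jpeg", "jpeg"), (".gif", "gif"),
--     (".mp4", "mp4"), (".mkv", "mkv"), (".ts", "ts"),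
--     (".mp3", "mp3"),
--     ("image", "jpg"), ("img", "jpg"),
--     ("video", "mp4"),
--     ("audio", "mp3"), ("music", "mp3"),
-- ]
--
-- def defaultExt(url, defExt="html"):
--     for sub, ext in _EXT_TABLE:
--         if sub in url:
--             return ext
--     return defExt
-- ===== Notes on version B (the rewrite author's own statement) =====
-- stated objective: simpler
-- what changed: Replaces the nested dict-of-lists loops plus the urlGuessExt helper with a single linear scan over one flat precedence-ordered (substring, extension) table.
import Mathlib
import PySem

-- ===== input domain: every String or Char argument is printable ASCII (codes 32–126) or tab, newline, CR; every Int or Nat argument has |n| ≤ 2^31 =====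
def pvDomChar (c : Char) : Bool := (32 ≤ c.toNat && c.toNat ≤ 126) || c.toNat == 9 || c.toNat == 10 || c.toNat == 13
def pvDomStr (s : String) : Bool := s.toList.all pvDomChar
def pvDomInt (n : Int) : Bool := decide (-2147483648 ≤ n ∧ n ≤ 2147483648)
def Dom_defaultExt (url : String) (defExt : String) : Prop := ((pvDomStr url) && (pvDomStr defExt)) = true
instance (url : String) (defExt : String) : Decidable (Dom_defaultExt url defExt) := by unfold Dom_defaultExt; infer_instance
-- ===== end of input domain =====

-- B replaces A's nested dict-of-lists loops plus the urlGuessExt helper with one linear scan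
-- over a flat precedence-ordered (substring, extension) table; same result, simpler structure.

-- ===== PORT A =====
-- "." + j computed as a transparent cons (exact for Python string concatenation of "." with j)
def pvDot (j : String) : String := String.ofList ('.' :: j.toList)

-- the dict literal `arr` in urlGuessExt
def pvArr : PySem.Dict String (List (List String)) :=
  PySem.Dict.ofList
    [ ("image", [["jpg", "jpeg", "gif"], ["image", "img"]])
    , ("video", [["mp4", "mkv", "ts"], ["video"]])
    , ("audio", [["mp3"], ["audio", "music"]]) ]

-- first loop of urlGuessExt: for i in arr: for j in arr[i][0]: if "." + j in url: return j
def pvLoop1 (url : String) : Option String :=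
  pvArr.keys.foldl
    (fun acc i => match acc with
      | some r => some r
      | none =>
        (PySem.List.pyGetD (pvArr.getD i []) 0 []).foldl
          (fun acc2 j => match acc2 with
            | some r => some r
            | none => if PySem.Str.isIn (pvDot j) url then some j else none)
          none)
    none

-- second loop of urlGuessExt: for i in arr: for j in arr[i][1]: if j in url: return arr[i][0][0]
def pvLoop2 (url : String) : Option String :=
  pvArr.keys.foldl
    (fun acc i => match acc with
      | some r => some r
      | none =>
        (PySem.List.pyGetD (pvArr.getD i []) 1 []).foldl
          (fun acc2 j => match acc2 with
            | some r => some r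
            | none =>
              if PySem.Str.isIn j url then
                some (PySem.List.pyGetD (PySem.List.pyGetD (pvArr.getD i []) 0 []) 0 "")
              else none)
          none)
    none

def urlGuessExt (url : String) : Option String :=
  match pvLoop1 url with
  | some r => some r
  | none => pvLoop2 url

def pvData : PySem.Dict String (List String) := PySem.Dict.ofList [("mp4", ["tiktok"])]

def defaultExt (url : String) (defExt : String) : String :=
  match pvData.keys.foldl
      (fun acc key => match acc with
        | some r => some r
        | none =>
          (pvData.getD key []).foldl
            (fun acc2 item => match acc2 with
              | some r => some r
              | none => if PySem.Str.isIn item url then some key else none)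
            none)
      none with
  | some r => r
  | none =>
    match urlGuessExt url with
    | some ext => if ext == "" then defExt else ext   -- `if ext:` — truthiness of the Optional[str]
    | none => defExt

-- ===== PORT B =====
def pvTable : List (String × String) :=
  [ ("tiktok", "mp4")
  , (".jpg", "jpg"), (".jpeg", "jpeg"), (".gif", "gif")
  , (".mp4", "mp4"), (".mkv", "mkv"), (".ts", "ts")
  , (".mp3", "mp3")
  , ("image", "jpg"), ("img", "jpg")
  , ("video", "mp4")
  , ("audio", "mp3"), ("music", "mp3") ]

def pvScan (table : List (String × String)) (url : String) (defExt : String) : String :=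
  match table with
  | [] => defExt
  | (sub, ext) :: rest => if PySem.Str.isIn sub url then ext else pvScan rest url defExt

def defaultExt_alt (url : String) (defExt : String) : String :=
  pvScan pvTable url defExt

-- ===== PRECONDITION & SPEC =====
def Spec_defaultExt (url : String) (defExt : String) (out : String) : Prop := out = defaultExt_alt url defExt
instance (url : String) (defExt : String) (out : String) : Decidable (Spec_defaultExt url defExt out) := by unfold Spec_defaultExt; infer_instance

-- ===== CLAIM (what is proved, stated in full; the proofs are below) =====
def Claim_equal_defaultExt : Prop := ∀ (url : String) (defExt : String), Dom_defaultExt url defExt → Spec_defaultExt url defExt (defaultExt url defExt)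

-- ===== LEMMAS AND PROOFS =====
-- literal-table evaluations (closed by kernel evaluation)
theorem pv_keys_arr : pvArr.keys = ["image", "video", "audio"] := by decide
theorem pv_arr_i0 : PySem.List.pyGetD (pvArr.getD "image" []) 0 [] = ["jpg", "jpeg", "gif"] := by decide
theorem pv_arr_v0 : PySem.List.pyGetD (pvArr.getD "video" []) 0 [] = ["mp4", "mkv", "ts"] := by decide
theorem pv_arr_a0 : PySem.List.pyGetD (pvArr.getD "audio" []) 0 [] = ["mp3"] := by decide
theorem pv_arr_i1 : PySem.List.pyGetD (pvArr.getD "image" []) 1 [] = ["image", "img"] := by decide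
theorem pv_arr_v1 : PySem.List.pyGetD (pvArr.getD "video" []) 1 [] = ["video"] := by decide
theorem pv_arr_a1 : PySem.List.pyGetD (pvArr.getD "audio" []) 1 [] = ["audio", "music"] := by decide
theorem pv_keys_data : pvData.keys = ["mp4"] := by decide
theorem pv_data_mp4 : pvData.getD "mp4" [] = ["tiktok"] := by decide
theorem pvDot_jpg : pvDot "jpg" = ".jpg" := by decide
theorem pvDot_jpeg : pvDot "jpeg" = ".jpeg" := by decide
theorem pvDot_gif : pvDot "gif" = ".gif" := by decide
theorem pvDot_mp4 : pvDot "mp4" = ".mp4" := by decide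
theorem pvDot_mkv : pvDot "mkv" = ".mkv" := by decide
theorem pvDot_ts : pvDot "ts" = ".ts" := by decide
theorem pvDot_mp3 : pvDot "mp3" = ".mp3" := by decide

-- loop characterizations: each loop of A is a first-match if-chain over its literal substrings
theorem pvLoop1_char (url : String) : pvLoop1 url =
    (if PySem.Str.isIn ".jpg" url then some "jpg"
     else if PySem.Str.isIn ".jpeg" url then some "jpeg"
     else if PySem.Str.isIn ".gif" url then some "gif"
     else if PySem.Str.isIn ".mp4" url then some "mp4"
     else if PySem.Str.isIn ".mkv" url then some "mkv"
     else if PySem.Str.isIn ".ts" url then some "ts"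
     else if PySem.Str.isIn ".mp3" url then some "mp3"
     else none) := by
  simp only [pvLoop1, pv_keys_arr, pv_arr_i0, pv_arr_v0, pv_arr_a0,
    pvDot_jpg, pvDot_jpeg, pvDot_gif, pvDot_mp4, pvDot_mkv, pvDot_ts, pvDot_mp3, List.foldl]
  split_ifs <;> rfl

set_option maxHeartbeats 1600000 in
theorem pvLoop2_char (url : String) : pvLoop2 url =
    (if PySem.Str.isIn "image" url then some "jpg"
     else if PySem.Str.isIn "img" url then some "jpg"
     else if PySem.Str.isIn "video" url then some "mp4"
     else if PySem.Str.isIn "audio" url then some "mp3"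
     else if PySem.Str.isIn "music" url then some "mp3"
     else none) := by
  simp only [pvLoop2, pv_keys_arr, pv_arr_i0, pv_arr_v0, pv_arr_a0,
    pv_arr_i1, pv_arr_v1, pv_arr_a1, List.foldl]
  split_ifs <;> rfl



-- ===== VERDICT (by name: the statement is the Claim_ definition above) =====
set_option maxHeartbeats 1600000 in
theorem defaultExt_spec : Claim_equal_defaultExt := by
  intro url defExt _
  unfold Spec_defaultExt
  show defaultExt url defExt = defaultExt_alt url defExt
  simp only [defaultExt, defaultExt_alt, urlGuessExt, pvScan, pvTable,
    pvLoop1_char, pvLoop2_char, pv_keys_data, pv_data_mp4, List.foldl]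
  by_cases h1 : PySem.Str.isIn "tiktok" url = true <;> simp only [h1, if_true, if_false, Bool.false_eq_true] <;> try rfl
  by_cases h2 : PySem.Str.isIn ".jpg" url = true <;> simp only [h2, if_true, if_false, Bool.false_eq_true] <;> try rfl
  by_cases h3 : PySem.Str.isIn ".jpeg" url = true <;> simp only [h3, if_true, if_false, Bool.false_eq_true] <;> try rfl
  by_cases h4 : PySem.Str.isIn ".gif" url = true <;> simp only [h4, if_true, if_false, Bool.false_eq_true] <;> try rfl
  by_cases h5 : PySem.Str.isIn ".mp4" url = true <;> simp only [h5, if_true, if_false, Bool.false_eq_true] <;> try rfl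
  by_cases h6 : PySem.Str.isIn ".mkv" url = true <;> simp only [h6, if_true, if_false, Bool.false_eq_true] <;> try rfl
  by_cases h7 : PySem.Str.isIn ".ts" url = true <;> simp only [h7, if_true, if_false, Bool.false_eq_true] <;> try rfl
  by_cases h8 : PySem.Str.isIn ".mp3" url = true <;> simp only [h8, if_true, if_false, Bool.false_eq_true] <;> try rfl
  by_cases h9 : PySem.Str.isIn "image" url = true <;> simp only [h9, if_true, if_false, Bool.false_eq_true] <;> try rfl
  by_cases h10 : PySem.Str.isIn "img" url = true <;> simp only [h10, if_true, if_false, Bool.false_eq_true] <;> try rfl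
  by_cases h11 : PySem.Str.isIn "video" url = true <;> simp only [h11, if_true, if_false, Bool.false_eq_true] <;> try rfl
  by_cases h12 : PySem.Str.isIn "audio" url = true <;> simp only [h12, if_true, if_false, Bool.false_eq_true] <;> try rfl
  by_cases h13 : PySem.Str.isIn "music" url = true <;> simp only [h13, if_true, if_false, Bool.false_eq_true] <;> try rfl
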